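-- pv_equiv track=rewrite | github.com/takapdayon/atcoder | abc/AtCoderBeginnerContest182/B.py | b182
-- ===== SOURCE A (Python) =====
-- def b182(n, alist):
--
--     ans = [0, 0]
--
--     for i in range(2, max(alist)+1):
--         count = 0
--         for w in alist:
--             if w % i == 0:
--                 count += 1
--         if ans[0] <= count:
--             ans[0] = count
--             ans[1] = i
--
--     return ans
-- ===== SOURCE B (Python) =====
-- def b182(n, alist):
--     m = max(alist)
--     if m < 2:
--         return [0, 0]
--     cnt = {}
--     zeros = 0
--     for w in alist:
--         a = abs(w)
--         if a == 0:
--             zeros += 1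
--         else:
--             d = 1
--             while d * d <= a:
--                 if a % d == 0:
--                     q = a // d
--                     if 2 <= d <= m:
--                         cnt[d] = cnt.get(d, 0) + 1
--                     if q != d and 2 <= q <= m:
--                         cnt[q] = cnt.get(q, 0) + 1
--                 d += 1
--     ans = [0, 0]
--     for i in range(2, m + 1):
--         c = cnt.get(i, 0) + zeros
--         if ans[0] <= c:
--             ans = [c, i]
--     return ans
-- ===== Notes on version B (the rewrite author's own statement) =====
-- stated objective: faster
-- what changed: Instead of testing every candidate i in 2..max against every element (O(max*n)), B enumerates each element's divisors up to its square root into a counter dict (plus a zeros count, since 0 is divisible by everything), then scans 2..max once with the same tie rule (ties -> larger divisor).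
import Mathlib
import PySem

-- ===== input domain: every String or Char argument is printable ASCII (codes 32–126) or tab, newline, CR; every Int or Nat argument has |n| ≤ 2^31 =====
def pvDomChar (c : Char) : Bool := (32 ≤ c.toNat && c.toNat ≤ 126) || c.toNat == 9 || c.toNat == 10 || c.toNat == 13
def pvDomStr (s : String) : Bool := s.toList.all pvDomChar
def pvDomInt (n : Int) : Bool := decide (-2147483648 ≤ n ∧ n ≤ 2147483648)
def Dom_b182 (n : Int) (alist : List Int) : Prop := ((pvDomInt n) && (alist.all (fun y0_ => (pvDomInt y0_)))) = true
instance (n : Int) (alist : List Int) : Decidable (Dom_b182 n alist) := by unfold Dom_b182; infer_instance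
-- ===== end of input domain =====

-- B enumerates each element's divisors up to its square root into a counter dict and scans 2..max once;
-- A instead tests every candidate in 2..max against every element.

-- ===== PORT A =====
def b182 (n : Int) (alist : List Int) : List Int :=
  let m := (PySem.List.max? alist (fun x => x)).getD 0   -- max(alist); Pre_ excludes the empty list, where Python raises
  (PySem.List.pyRange 2 (m + 1) 1).foldl (fun ans i =>
    let count := alist.foldl (fun c w => if PySem.Int.mod w i = 0 then c + 1 else c) (0 : Int)
    if PySem.List.pyGetD ans 0 0 ≤ count then [count, i] else ans) [0, 0]

-- ===== PORT B =====
-- body of the while loop: record the divisor pair (d, a // d) of a into the counter (slots kept within [2, m])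
def b182DivStep (a m d : Int) (cnt : PySem.Dict Int Int) : PySem.Dict Int Int :=
  if PySem.Int.mod a d = 0 then
    let q := PySem.Int.floordiv a d
    let cnt0 := if 2 ≤ d ∧ d ≤ m then cnt.insert d (cnt.getD d 0 + 1) else cnt
    if q ≠ d ∧ 2 ≤ q ∧ q ≤ m then cnt0.insert q (cnt0.getD q 0 + 1) else cnt0
  else cnt

-- while d * d <= a: …; d += 1
def b182DivLoop (a m : Int) (d : Int) (cnt : PySem.Dict Int Int) : PySem.Dict Int Int :=
  if h : d * d ≤ a then b182DivLoop a m (d + 1) (b182DivStep a m d cnt) else cnt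
  termination_by (a + 1 - d).toNat
  decreasing_by
    have hd : d ≤ d * d := by nlinarith [mul_self_nonneg (d - 1), mul_self_nonneg d]
    omega

def b182_alt (n : Int) (alist : List Int) : List Int :=
  let m := (PySem.List.max? alist (fun x => x)).getD 0   -- max(alist); Pre_ excludes the empty list, where Python raises
  if m < 2 then [0, 0]
  else
    let st := alist.foldl (fun (st : PySem.Dict Int Int × Int) w =>
      let a := |w|
      if a = 0 then (st.1, st.2 + 1) else (b182DivLoop a m 1 st.1, st.2)) (PySem.Dict.empty, (0 : Int))
    (PySem.List.pyRange 2 (m + 1) 1).foldl (fun ans i =>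
      let c := st.1.getD i 0 + st.2
      if PySem.List.pyGetD ans 0 0 ≤ c then [c, i] else ans) [0, 0]

-- ===== PRECONDITION & SPEC =====
-- Pre_ excludes only the empty list, on which Python's max([]) raises ValueError (in A and in B alike).
def Pre_b182 (n : Int) (alist : List Int) : Prop := alist ≠ []
instance (n : Int) (alist : List Int) : Decidable (Pre_b182 n alist) := by unfold Pre_b182; infer_instance
def pvWitness_b182 : Int × List Int := (3, [4, 6, 12, 7])

def Spec_b182 (n : Int) (alist : List Int) (out : List Int) : Prop := out = b182_alt n alist
instance (n : Int) (alist : List Int) (out : List Int) : Decidable (Spec_b182 n alist out) := by unfold Spec_b182; infer_instance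

-- ===== CLAIM (what is proved, stated in full; the proofs are below) =====
def Claim_equal_b182 : Prop := ∀ (n : Int) (alist : List Int), Dom_b182 n alist → Pre_b182 n alist → Spec_b182 n alist (b182 n alist)

-- ===== LEMMAS AND PROOFS =====

-- one step of the divisor loop, seen at a fixed slot e
theorem b182_getD_divStep (a m d e : Int) (cnt : PySem.Dict Int Int) (hd : 1 ≤ d)
    (hmod : PySem.Int.mod a d = 0) :
    (b182DivStep a m d cnt).getD e 0 = cnt.getD e 0 +
      (if e = d ∧ 2 ≤ d ∧ d ≤ m then 1 else 0) +
      (if e * d = a ∧ e ≠ d ∧ 2 ≤ e ∧ e ≤ m then 1 else 0) := by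
  have hd0 : (0:Int) < d := by omega
  have hdvd : d ∣ a := (PySem.Int.mod_eq_zero_iff_dvd a d).mp hmod
  have hqd : a / d * d = a := Int.ediv_mul_cancel hdvd
  have heq : (e = a / d) ↔ (e * d = a) := by
    constructor
    · rintro rfl; exact hqd
    · intro hx
      have : e * d = a / d * d := by rw [hx, hqd]
      exact mul_right_cancel₀ (by omega) this
  have hq : PySem.Int.floordiv a d = a / d := PySem.Int.floordiv_eq_ediv_of_pos hd0
  simp only [b182DivStep, hmod, if_true, hq, ← heq]
  clear hdvd hqd hmod hq
  generalize a / d = Q at heq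
  clear heq
  by_cases hed : e = d <;> by_cases heQ : e = Q <;> subst_vars <;>
    split_ifs <;>
    (try simp only [PySem.Dict.getD_insert]) <;>
    (try split_ifs) <;> omega

-- the divisor loop from d, seen at a fixed slot e in [2, m]: it adds 1 to the slot for the
-- small-divisor role (d ≤ e, e² ≤ a) and 1 for the cofactor role (a/e ≥ d, e² > a)
theorem b182_getD_divLoop (a m e : Int) (ha : 0 < a) (he2 : 2 ≤ e) (hem : e ≤ m) :
    ∀ (k : Nat) (d : Int) (cnt : PySem.Dict Int Int), 1 ≤ d → (a + 1 - d).toNat ≤ k →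
    (b182DivLoop a m d cnt).getD e 0 = cnt.getD e 0 +
      (if e ∣ a ∧ d ≤ e ∧ e * e ≤ a then 1 else 0) +
      (if e ∣ a ∧ d * e ≤ a ∧ a < e * e then 1 else 0) := by
  intro k
  induction k with
  | zero =>
      intro d cnt hd hk
      have hda : a < d := by omega
      have h : ¬ d * d ≤ a := by nlinarith
      rw [b182DivLoop, dif_neg h]
      have h1 : ¬ (e ∣ a ∧ d ≤ e ∧ e * e ≤ a) := by rintro ⟨-, h2, h3⟩; nlinarith
      have h2 : ¬ (e ∣ a ∧ d * e ≤ a ∧ a < e * e) := by rintro ⟨-, h2, h3⟩; nlinarith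
      simp [h1, h2]
  | succ k ih =>
      intro d cnt hd hk
      by_cases h : d * d ≤ a
      · have hdle : d ≤ a := by nlinarith
        rw [b182DivLoop, dif_pos h]
        rw [ih (d + 1) (b182DivStep a m d cnt) (by omega) (by omega)]
        by_cases hmod : PySem.Int.mod a d = 0
        · have hdvd : d ∣ a := (PySem.Int.mod_eq_zero_iff_dvd a d).mp hmod
          rw [b182_getD_divStep a m d e cnt hd hmod]
          -- arithmetic bookkeeping over the four indicators
          by_cases hea : e ∣ a
          · obtain ⟨c, hc⟩ := hea
            have hea' : e ∣ a := ⟨c, hc⟩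
            have he0 : (0:Int) < e := by omega
            by_cases hed : e = d
            · subst hed
              have h1 : ¬ (e * e = a ∧ e ≠ e ∧ 2 ≤ e ∧ e ≤ m) := by tauto
              have h2 : ¬ (e + 1 ≤ e) := by omega
              have h3 : ¬ ((e + 1) * e ≤ a ∧ a < e * e) := by rintro ⟨hx, hy⟩; nlinarith
              have h4 : ¬ (a < e * e) := by omega
              simp [h1, h2, h3, h4, he2, hem, hea', h, le_refl]
            · -- e ≠ d
              have hstep1 : ¬ (e = d ∧ 2 ≤ d ∧ d ≤ m) := by tauto
              by_cases heq : e * d = a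
              · -- e is the cofactor: d < e (since d*d ≤ a = e*d), so a < e*e
                have hde : d < e := by
                  rcases lt_trichotomy d e with h' | h' | h'
                  · exact h'
                  · exact absurd h'.symm hed
                  · nlinarith
                have haee : a < e * e := by nlinarith
                have h1 : (e ∣ a ∧ d * e ≤ a ∧ a < e * e) := ⟨hea', by nlinarith, haee⟩
                have h2 : ¬ ((d + 1) * e ≤ a) := by nlinarith
                have h3 : ¬ (e * e ≤ a) := by omega
                have hstep2 : (e * d = a ∧ e ≠ d ∧ 2 ≤ e ∧ e ≤ m) := ⟨heq, hed, he2, hem⟩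
                simp [h1, h2, h3, hstep1, hstep2, hea']
              · -- e neither d nor the cofactor: both indicator pairs agree
                have hstep2 : ¬ (e * d = a ∧ e ≠ d ∧ 2 ≤ e ∧ e ≤ m) := by tauto
                have hle : (d ≤ e) ↔ (d + 1 ≤ e) := by
                  constructor <;> intro hx
                  · rcases eq_or_lt_of_le hx with h' | h'
                    · exact absurd h'.symm hed
                    · omega
                  · omega
                have hmul : (d * e ≤ a) ↔ ((d + 1) * e ≤ a) := by
                  constructor <;> intro hx
                  · -- if d*e ≤ a < (d+1)*e then a = c*e with d ≤ c < d+1, so e*d = a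
                    by_contra hy
                    push_neg at hy
                    have hc1 : d ≤ c := by nlinarith
                    have hc2 : c ≤ d := by nlinarith
                    have hcd : c = d := le_antisymm hc2 hc1
                    exact heq (by rw [hc, hcd])
                  · nlinarith
                simp [hstep1, hstep2, hle, hmul]
          · have h1 : ∀ P : Prop, ¬ (e ∣ a ∧ P) := by rintro P ⟨hx, -⟩; exact hea hx
            have hstep2 : ¬ (e * d = a ∧ e ≠ d ∧ 2 ≤ e ∧ e ≤ m) := by
              rintro ⟨hx, -⟩; exact hea ⟨d, hx.symm⟩
            have hstep1 : ¬ (e = d ∧ 2 ≤ d ∧ d ≤ m) := by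
              rintro ⟨rfl, -⟩; exact hea hdvd
            simp [h1, hstep1, hstep2]
        · -- d does not divide a: the step is the identity and the indicators agree
          have hndvd : ¬ d ∣ a := fun hx => hmod ((PySem.Int.mod_eq_zero_iff_dvd a d).mpr hx)
          have hstep : b182DivStep a m d cnt = cnt := by
            unfold b182DivStep; rw [if_neg hmod]
          rw [hstep]
          by_cases hea : e ∣ a
          · obtain ⟨c, hc⟩ := hea
            have hea' : e ∣ a := ⟨c, hc⟩
            have he0 : (0:Int) < e := by omega
            have hed : ¬ e = d := by rintro rfl; exact hndvd hea' 
            have hle : (d ≤ e) ↔ (d + 1 ≤ e) := by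
              constructor <;> intro hx
              · rcases eq_or_lt_of_le hx with h' | h'
                · exact absurd h'.symm hed
                · omega
              · omega
            have hmul : (d * e ≤ a) ↔ ((d + 1) * e ≤ a) := by
              constructor <;> intro hx
              · by_contra hy
                push_neg at hy
                have hc1 : d ≤ c := by nlinarith
                have hc2 : c ≤ d := by nlinarith
                have hcd : c = d := le_antisymm hc2 hc1
                exact hndvd ⟨e, by rw [hc, hcd]; ring⟩
              · nlinarith
            simp [hle, hmul]
          · have h1 : ∀ P : Prop, ¬ (e ∣ a ∧ P) := by rintro P ⟨hx, -⟩; exact hea hx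
            simp [h1]
      · -- loop exit inside the fuel: both indicators are zero
        rw [b182DivLoop, dif_neg h]
        have h1 : ¬ (e ∣ a ∧ d ≤ e ∧ e * e ≤ a) := by
          rintro ⟨-, h2, h3⟩; nlinarith
        have h2 : ¬ (e ∣ a ∧ d * e ≤ a ∧ a < e * e) := by
          rintro ⟨-, h2, h3⟩; nlinarith
        simp [h1, h2]

-- the element fold counts, at each slot e in [2, m] (zeros counted separately), the elements divisible by e
theorem b182_fold_count (m e : Int) (he2 : 2 ≤ e) (hem : e ≤ m) :
    ∀ (alist : List Int) (st : PySem.Dict Int Int × Int),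
    (alist.foldl (fun (st : PySem.Dict Int Int × Int) w =>
        let a := |w|
        if a = 0 then (st.1, st.2 + 1) else (b182DivLoop a m 1 st.1, st.2)) st).1.getD e 0 +
    (alist.foldl (fun (st : PySem.Dict Int Int × Int) w =>
        let a := |w|
        if a = 0 then (st.1, st.2 + 1) else (b182DivLoop a m 1 st.1, st.2)) st).2 =
    st.1.getD e 0 + st.2 + (alist.countP (fun w => decide (e ∣ w)) : Int) := by
  intro alist
  induction alist with
  | nil => intro st; simp
  | cons w t iht =>
      intro st
      simp only [List.foldl_cons, List.countP_cons]
      rw [iht]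
      by_cases hw : |w| = 0
      · have hw0 : w = 0 := abs_eq_zero.mp hw
        subst hw0
        simp
        push_cast
        ring
      · have ha : 0 < |w| := by
          rcases abs_nonneg w |>.lt_or_eq with h' | h'
          · exact h'
          · exact absurd h'.symm hw
        simp only [hw, if_neg, reduceIte]
        rw [b182_getD_divLoop (|w|) m e ha he2 hem ((|w| + 1 - 1).toNat) 1 st.1 (by omega) (by omega)]
        by_cases hdvd : e ∣ |w|
        · have hdw : e ∣ w := (dvd_abs e w).mp hdvd
          have hle : e ≤ |w| := Int.le_of_dvd ha hdvd
          have h1e : (1:Int) ≤ e := by omega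
          by_cases hsq : e * e ≤ |w|
          · have hns : ¬ (|w| < e * e) := by omega
            simp [hdvd, hdw, hsq, hns, h1e]
            push_cast
            ring
          · have hns : |w| < e * e := by omega
            simp [hdvd, hdw, hsq, hns, h1e, hle]
            push_cast
            ring
        · have hdw : ¬ e ∣ w := fun hx => hdvd ((dvd_abs e w).mpr hx)
          simp [hdvd, hdw]

-- A's inner loop is the count of elements divisible by i
theorem b182_count_eq (alist : List Int) (i : Int) :
    alist.foldl (fun c w => if PySem.Int.mod w i = 0 then c + 1 else c) (0 : Int) =
      (alist.countP (fun w => decide (i ∣ w)) : Int) := by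
  rw [PySem.List.foldl_ite_add_one (fun w => PySem.Int.mod w i = 0) alist 0]
  have hfun : (fun w => decide (PySem.Int.mod w i = 0)) = fun w : Int => decide (i ∣ w) := by
    funext w
    simp [PySem.Int.mod_eq_zero_iff_dvd]
  rw [hfun]
  ring

-- the two ports agree on every input (the precondition is not even needed for the ports themselves)
theorem b182_eq_alt (n : Int) (alist : List Int) : b182 n alist = b182_alt n alist := by
  simp only [b182, b182_alt]
  by_cases hm2 : (PySem.List.max? alist (fun x => x)).getD 0 < 2
  · rw [if_pos hm2, PySem.List.pyRange_one_eq_nil (by omega)]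
    simp
  · rw [if_neg hm2]
    apply PySem.List.foldl_congr_mem
    intro acc i hi
    rw [PySem.List.mem_pyRange_one] at hi
    have hi2 : 2 ≤ i := hi.1
    have him : i ≤ (PySem.List.max? alist (fun x => x)).getD 0 := by omega
    beta_reduce
    rw [b182_count_eq alist i,
        b182_fold_count ((PySem.List.max? alist (fun x => x)).getD 0) i hi2 him alist
          (PySem.Dict.empty, 0), PySem.Dict.getD_empty]
    norm_num

-- ===== VERDICT (by name: the statement is the Claim_ definition above) =====
theorem b182_spec : Claim_equal_b182 := by
  intro n alist _ _
  unfold Spec_b182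
  exact b182_eq_alt n alist
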